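-- pv_equiv track=rewrite | github.com/NimaFathi/CE40324-MIR | src/QueryCorrection.py | correct_query
-- ===== SOURCE A (Python) =====
-- def jaccard_similarity(word1, word2):
--     # intersection = len(list(set(word1).intersection(word2)))
--     # union = (len(word1) + len(word2)) - intersection
--     # return float(intersection) / union
--
--     bigrams1 = [word1[i:i + 2] for i in range(len(word1) - 1)]
--     bigrams2 = [word2[i:i + 2] for i in range(len(word2) - 1)]
--     intersection = len(list(set(bigrams1).intersection(set(bigrams2))))
--     union = len(set(bigrams1)) + len(set(bigrams2)) - intersection
--     return float(intersection) / union
--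
-- def similar_words_j(dictionary, in_word):
--     jaccard_list = []
--     for dest_word in dictionary:
--         jaccard_list.append((dest_word, jaccard_similarity(in_word, dest_word)))
--     jaccard_list = sorted(jaccard_list, key=lambda x: x[1], reverse=True)
--     similars = []
--     size = len(jaccard_list)
--     if size > 10:
--         size = 10
--     for i in range(size):
--         similars.append(jaccard_list[i][0])
--     return similars
--
-- def levenshtein_distance(word1, word2):
--     if len(word1) > len(word2):
--         word1, word2 = word2, word1
--
--     distances = range(len(word1) + 1)
--     for i2, c2 in enumerate(word2):
--         distances_ = [i2 + 1]
--         for i1, c1 in enumerate(word1):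
--             if c1 == c2:
--                 distances_.append(distances[i1])
--             else:
--                 distances_.append(1 + min((distances[i1], distances[i1 + 1], distances_[-1])))
--         distances = distances_
--     return distances[-1]
--
-- def similar_words_l(dictionary, in_word):
--     distance_list = []
--     for dest_word in dictionary:
--         distance_list.append((dest_word, levenshtein_distance(dest_word, in_word)))
--     distance_list = sorted(distance_list, key=lambda x: x[1])
--     size = len(distance_list)
--     if size > 10:
--         size = 10
--     min_distance = distance_list[size - 1][1]
--     similars = []
--     for dist in distance_list:
--         if dist[1] <= min_distance:
--             similars.append(dist[0])
--         else:
--             break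
--     return similars
--
-- def correct_query(q, dictionary):
--     modified_query = []
--     for word in q.split():
--         if word in dictionary:
--             modified_query[len(modified_query):] = [word]
--         else:
--             result_j = similar_words_j(dictionary, word)
--             if len(result_j) == 0:
--                 result_l = similar_words_l(dictionary, word)
--             else:
--                 result_l = similar_words_l(result_j, word)
--             modified_query.append(result_l[0])
--     return modified_query
-- ===== SOURCE B (Python) =====
-- def _jac(w1, w2):
--     b1 = {w1[i:i + 2] for i in range(len(w1) - 1)}
--     b2 = {w2[i:i + 2] for i in range(len(w2) - 1)}
--     inter = len(b1 & b2)
--     return inter / (len(b1) + len(b2) - inter)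
--
-- def _lev(a, b):
--     if len(a) > len(b):
--         a, b = b, a
--     prev = list(range(len(a) + 1))
--     for i2, c2 in enumerate(b):
--         cur = [i2 + 1]
--         for i1, c1 in enumerate(a):
--             cur.append(prev[i1] if c1 == c2 else 1 + min(prev[i1], prev[i1 + 1], cur[-1]))
--         prev = cur
--     return prev[-1]
--
-- def correct_query(q, dictionary):
--     out = []
--     for word in q.split():
--         if word in dictionary:
--             out.append(word)
--             continue
--         # bounded stable insertion: `top` holds the (at most 10) best (word, sim)
--         # pairs, descending by sim, ties in dictionary order -- no full sort.
--         top = []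
--         for d in dictionary:
--             s = _jac(word, d)
--             pos = 0
--             while pos < len(top) and top[pos][1] >= s:
--                 pos += 1
--             top = (top[:pos] + [(d, s)] + top[pos:])[:10]
--         # first word of minimal edit distance among the candidates -- no second
--         # sort, no threshold prefix: only the argmin is ever used.
--         out.append(min((d for d, _ in top), key=lambda d: _lev(d, word)))
--     return out
-- ===== Notes on version B (the rewrite author's own statement) =====
-- stated objective: alternative
-- what changed: Per query word, B replaces A's full sort of all (word, jaccard) pairs plus slice with a bounded stable insertion into a 10-element candidate list, and replaces A's second full sort plus threshold-prefix of Levenshtein distances with a single first-argmin pass (A only ever uses element 0 of that list); the per-word selection drops from O(n log n) to O(n), though the similarity computations dominate the measured time.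
import Mathlib
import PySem

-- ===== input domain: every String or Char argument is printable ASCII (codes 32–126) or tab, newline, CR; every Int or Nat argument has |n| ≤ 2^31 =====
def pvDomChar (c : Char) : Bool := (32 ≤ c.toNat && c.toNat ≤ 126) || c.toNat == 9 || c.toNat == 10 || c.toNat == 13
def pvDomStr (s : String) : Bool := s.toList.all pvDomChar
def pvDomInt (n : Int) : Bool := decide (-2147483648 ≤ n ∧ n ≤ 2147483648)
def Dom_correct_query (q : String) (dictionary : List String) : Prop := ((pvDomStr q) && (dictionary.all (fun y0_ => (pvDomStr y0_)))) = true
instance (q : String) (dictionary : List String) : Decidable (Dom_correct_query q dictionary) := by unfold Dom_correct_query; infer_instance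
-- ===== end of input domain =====

-- B replaces A's per-word full sort + slice by a bounded stable insertion list of the 10 best
-- Jaccard candidates and replaces the second sort + threshold prefix by a single first-argmin pass
-- (only the first element of A's Levenshtein list is ever used).  Objective: alternative selection
-- mechanism (the similarity computations dominate, so the measured running times are similar).
-- Python's float similarity intersection/union is modelled as the exact rational ℚ in both ports
-- (the quotients arising here are far below double precision's rounding range).

-- ===== PORT A =====
def jacA (word1 word2 : String) : ℚ :=
  let cs1 := word1.toList
  let cs2 := word2.toList
  let bigrams1 := (PySem.List.pyRange 0 ((cs1.length : Int) - 1)).map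
    (fun i => PySem.List.slice cs1 (some i) (some (i + 2)))
  let bigrams2 := (PySem.List.pyRange 0 ((cs2.length : Int) - 1)).map
    (fun i => PySem.List.slice cs2 (some i) (some (i + 2)))
  let s1 := PySem.Set.ofList bigrams1
  let s2 := PySem.Set.ofList bigrams2
  let intersection : Int := (PySem.Set.inter s1 s2).length
  let union : Int := (s1.length : Int) + (s2.length : Int) - intersection
  -- float(intersection) / union; ℚ division by 0 is 0, but union = 0 (ZeroDivisionError) is outside Pre_
  (intersection : ℚ) / (union : ℚ)

def similarWordsJ (dictionary : List String) (in_word : String) : List String :=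
  let jaccard_list := dictionary.foldl (fun acc dest => acc ++ [(dest, jacA in_word dest)]) []
  let jaccard_list := PySem.List.sorted jaccard_list (fun x => x.2) true
  let size : Int := jaccard_list.length
  let size : Int := if size > 10 then 10 else size
  (PySem.List.pyRange 0 size).foldl
    (fun acc i => acc ++ [(PySem.List.pyGetD jaccard_list i ("", 0)).1]) []

def levA (word1 word2 : String) : Int :=
  let p := if word1.toList.length > word2.toList.length
    then (word2.toList, word1.toList) else (word1.toList, word2.toList)
  let w1 := p.1
  let w2 := p.2
  let distances : List Int := PySem.List.pyRange 0 ((w1.length : Int) + 1)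
  let distances := (PySem.List.enumerate w2).foldl (fun distances pc =>
      (PySem.List.enumerate w1).foldl (fun ds pc1 =>
        if pc1.2 == pc.2 then ds ++ [PySem.List.pyGetD distances pc1.1 0]
        else ds ++ [1 + min (min (PySem.List.pyGetD distances pc1.1 0)
                                 (PySem.List.pyGetD distances (pc1.1 + 1) 0))
                            (PySem.List.pyGetD ds (-1) 0)])
        [pc.1 + 1]) distances
  PySem.List.pyGetD distances (-1) 0

-- A's 'for dist in distance_list: … else break' loop
def collectLE (md : Int) : List (String × Int) → List String
  | [] => []
  | p :: r => if p.2 ≤ md then p.1 :: collectLE md r else []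

def similarWordsL (dictionary : List String) (in_word : String) : List String :=
  let distance_list := dictionary.foldl (fun acc dest => acc ++ [(dest, levA dest in_word)]) []
  let distance_list := PySem.List.sorted distance_list (fun x => x.2) false
  let size : Int := distance_list.length
  let size : Int := if size > 10 then 10 else size
  -- distance_list[size - 1]: IndexError on an empty dictionary is outside Pre_ (pyGetD guard only)
  let min_distance := (PySem.List.pyGetD distance_list (size - 1) ("", 0)).2
  collectLE min_distance distance_list

def correct_query (q : String) (dictionary : List String) : List String :=
  (PySem.Str.split₀ q).foldl (fun modified_query word =>
    if dictionary.contains word then modified_query ++ [word]   -- slice assignment = append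
    else
      let result_j := similarWordsJ dictionary word
      let result_l := if result_j.length = 0 then similarWordsL dictionary word
                      else similarWordsL result_j word
      -- result_l[0]: IndexError on an empty dictionary is outside Pre_ (pyGetD guard only)
      modified_query ++ [PySem.List.pyGetD result_l 0 ""]) []

-- ===== PORT B =====
def jacB (w1 w2 : String) : ℚ :=
  let b1 := PySem.Set.ofList ((PySem.List.pyRange 0 ((w1.toList.length : Int) - 1)).map
    (fun i => PySem.List.slice w1.toList (some i) (some (i + 2))))
  let b2 := PySem.Set.ofList ((PySem.List.pyRange 0 ((w2.toList.length : Int) - 1)).map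
    (fun i => PySem.List.slice w2.toList (some i) (some (i + 2))))
  let inter : Int := (PySem.Set.inter b1 b2).length
  (inter : ℚ) / (((b1.length : Int) + (b2.length : Int) - inter : Int) : ℚ)

def levB (a b : String) : Int :=
  let p := if a.toList.length > b.toList.length
    then (b.toList, a.toList) else (a.toList, b.toList)
  let w1 := p.1
  let w2 := p.2
  let prev : List Int := PySem.List.pyRange 0 ((w1.length : Int) + 1)
  let prev := (PySem.List.enumerate w2).foldl (fun prev pc =>
      (PySem.List.enumerate w1).foldl (fun cur pc1 =>
        if pc1.2 == pc.2 then cur ++ [PySem.List.pyGetD prev pc1.1 0]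
        else cur ++ [1 + min (min (PySem.List.pyGetD prev pc1.1 0)
                                  (PySem.List.pyGetD prev (pc1.1 + 1) 0))
                             (PySem.List.pyGetD cur (-1) 0)])
        [pc.1 + 1]) prev
  PySem.List.pyGetD prev (-1) 0

-- B's 'while pos < len(top) and top[pos][1] >= s' position scan
def posB (s : ℚ) : List (String × ℚ) → Nat
  | [] => 0
  | p :: r => if s ≤ p.2 then posB s r + 1 else 0

def topStep (word : String) (top : List (String × ℚ)) (d : String) : List (String × ℚ) :=
  let s := jacB word d
  let pos := posB s top
  (top.take pos ++ (d, s) :: top.drop pos).take 10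

def correct_query_alt (q : String) (dictionary : List String) : List String :=
  (PySem.Str.split₀ q).foldl (fun out word =>
    if dictionary.contains word then out ++ [word]
    else
      let top := dictionary.foldl (topStep word) []
      -- min(...) : ValueError on an empty dictionary is outside Pre_ (getD guard only)
      out ++ [(PySem.List.min? (top.map (fun p => p.1)) (fun d => levB d word)).getD ""]) []

-- ===== PRECONDITION & SPEC =====
-- Pre_ excludes exactly the inputs where the Python A raises: a query word absent from an empty
-- dictionary (IndexError in similar_words_l), and a query word of length < 2 absent from the
-- dictionary while some dictionary word also has length < 2 (ZeroDivisionError in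
-- jaccard_similarity: both bigram sets are empty).
def Pre_correct_query (q : String) (dictionary : List String) : Prop :=
  ∀ w ∈ PySem.Str.split₀ q, w ∈ dictionary ∨
    (dictionary ≠ [] ∧ (2 ≤ w.length ∨ ∀ d ∈ dictionary, 2 ≤ d.length))
instance (q : String) (dictionary : List String) : Decidable (Pre_correct_query q dictionary) := by
  unfold Pre_correct_query; infer_instance
def pvWitness_correct_query : String × List String := ("helo wrld", ["hello", "world", "help"])

def Spec_correct_query (q : String) (dictionary : List String) (out : List String) : Prop :=
  out = correct_query_alt q dictionary
instance (q : String) (dictionary : List String) (out : List String) :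
    Decidable (Spec_correct_query q dictionary out) := by unfold Spec_correct_query; infer_instance

-- ===== CLAIM (what is proved, stated in full; the proofs are below) =====
def Claim_equal_correct_query : Prop := ∀ (q : String) (dictionary : List String),
  Dom_correct_query q dictionary → Pre_correct_query q dictionary →
    Spec_correct_query q dictionary (correct_query q dictionary)

-- ===== LEMMAS AND PROOFS =====

theorem jac_eq (w1 w2 : String) : jacB w1 w2 = jacA w1 w2 := rfl

theorem lev_eq (a b : String) : levB a b = levA a b := rfl

-- B's position scan + splice is exactly insertion-sort's insertBy for the descending order
theorem insert_pos_eq (d : String) (s : ℚ) (m : List (String × ℚ)) :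
    m.take (posB s m) ++ (d, s) :: m.drop (posB s m)
      = PySem.List.insertBy (fun a b => decide ((b : String × ℚ).2 < a.2)) (d, s) m := by
  induction m with
  | nil => simp [posB, PySem.List.insertBy]
  | cons p r ih =>
    by_cases h : s ≤ p.2
    · simp [posB, PySem.List.insertBy, h, not_lt.mpr h, ih]
    · simp [posB, PySem.List.insertBy, h, lt_of_not_ge h]

theorem take_insertBy {α : Type} (bf : α → α → Bool) (x : α) (m : List α) (N : Nat) :
    (PySem.List.insertBy bf x (m.take N)).take N = (PySem.List.insertBy bf x m).take N := by
  induction m generalizing N with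
  | nil => simp
  | cons y ys ih =>
    cases N with
    | zero => simp
    | succ n =>
      by_cases h : bf x y
      · cases n with
        | zero => simp [PySem.List.insertBy, h]
        | succ k =>
          simp only [PySem.List.insertBy, h, if_pos, List.take_succ_cons, List.take_take]
          simp
      · simp [PySem.List.insertBy, h, List.take_succ_cons, ih]

theorem top_fold (w : String) (dict : List String) : ∀ (m : List (String × ℚ)),
    dict.foldl (topStep w) (m.take 10)
      = ((dict.map (fun d => (d, jacA w d))).foldl
          (fun acc x => PySem.List.insertBy (fun a b => decide ((b : String × ℚ).2 < a.2)) x acc) m).take 10 := by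
  induction dict with
  | nil => intro m; simp
  | cons d t ih =>
    intro m
    simp only [List.foldl_cons, List.map_cons]
    have h1 : topStep w (m.take 10) d
        = (PySem.List.insertBy (fun a b => decide ((b : String × ℚ).2 < a.2)) (d, jacA w d) m).take 10 := by
      show List.take 10 (List.take (posB (jacB w d) (List.take 10 m)) (List.take 10 m)
          ++ (d, jacB w d) :: List.drop (posB (jacB w d) (List.take 10 m)) (List.take 10 m)) = _
      rw [insert_pos_eq, take_insertBy, jac_eq]
    rw [h1, ih]

theorem top_eq_sorted (w : String) (dict : List String) :
    dict.foldl (topStep w) []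
      = (PySem.List.sorted (dict.map (fun d => (d, jacA w d))) (fun x => x.2) true).take 10 := by
  rw [PySem.List.sorted_rev_eq_foldl_insertBy]
  simpa using top_fold w dict []

theorem range_map_getD {α : Type} (xs : List α) (n : Nat) (d : α) (h : n ≤ xs.length) :
    (List.range n).map (fun k => xs.getD k d) = xs.take n := by
  apply List.ext_getElem
  · simp [Nat.min_eq_left h]
  · intro i h1 h2
    have hi : i < n := by simpa using h1
    have hix : i < xs.length := lt_of_lt_of_le hi h
    simp [List.getD_eq_getElem?_getD, List.getElem?_eq_getElem hix]

theorem simJ_eq_top (dict : List String) (w : String) :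
    similarWordsJ dict w = (dict.foldl (topStep w) []).map (fun p => p.1) := by
  rw [top_eq_sorted]
  unfold similarWordsJ
  simp only [PySem.List.foldl_append_singleton_eq_map, List.nil_append]
  set sj := PySem.List.sorted (dict.map (fun d => (d, jacA w d))) (fun x => x.2) true with hsj
  have hn : (if ((sj.length : Int)) > 10 then (10 : Int) else (sj.length : Int))
      = ((min 10 sj.length : Nat) : Int) := by
    split_ifs with h <;> push_cast <;> omega
  rw [hn, PySem.List.pyRange_zero_natCast, List.map_map]
  have h2 : (List.range (min 10 sj.length)).map
        ((fun i => (PySem.List.pyGetD sj i ("", (0:ℚ))).1) ∘ (fun k : Nat => (k : Int)))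
      = ((List.range (min 10 sj.length)).map (fun k => sj.getD k ("", (0:ℚ)))).map (fun p => p.1) := by
    rw [List.map_map]
    apply List.map_congr_left
    intro k _
    simp [PySem.List.pyGetD_natCast]
  rw [h2, range_map_getD _ _ _ (Nat.min_le_right _ _)]
  congr 1
  rcases le_total sj.length 10 with h | h
  · rw [Nat.min_eq_right h]; simp [List.take_of_length_le h]
  · rw [Nat.min_eq_left h]

theorem insertBy_map {α κ : Type} [LinearOrder κ] (key : α → κ) (x : α) (m : List α) :
    PySem.List.insertBy (fun a b => decide ((a : α × κ).2 < b.2)) (x, key x)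
        (m.map (fun y => (y, key y)))
      = (PySem.List.insertBy (fun a b => decide (key a < key b)) x m).map (fun y => (y, key y)) := by
  induction m with
  | nil => simp [PySem.List.insertBy]
  | cons y ys ih =>
    by_cases h : key x < key y
    · simp [PySem.List.insertBy, h]
    · simp [PySem.List.insertBy, h, ih]

theorem sorted_map_pf {α κ : Type} [LinearOrder κ] (key : α → κ) (l : List α) :
    PySem.List.sorted (l.map (fun y => (y, key y))) (fun p => p.2) false
      = (PySem.List.sorted l key false).map (fun y => (y, key y)) := by
  rw [PySem.List.sorted_eq_foldl_insertBy, PySem.List.sorted_eq_foldl_insertBy, List.foldl_map]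
  have : ∀ (l : List α) (m : List α),
      l.foldl (fun acc y => PySem.List.insertBy (fun a b => decide ((a : α × κ).2 < b.2)) (y, key y) acc)
          (m.map (fun y => (y, key y)))
        = (l.foldl (fun acc y => PySem.List.insertBy (fun a b => decide (key a < key b)) y acc) m).map
            (fun y => (y, key y)) := by
    intro l
    induction l with
    | nil => simp
    | cons a t ih => intro m; simp only [List.foldl_cons, insertBy_map key a m, ih]
  simpa using this l []

theorem min?_eq_head_sorted {α κ : Type} [LinearOrder κ] (l : List α) (key : α → κ) :
    PySem.List.min? l key = (PySem.List.sorted l key false).head? := by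
  induction l using List.reverseRecOn with
  | nil => simp [PySem.List.min?, PySem.List.sorted]
  | append_singleton t x ih =>
    have hs : PySem.List.sorted (t ++ [x]) key false
        = PySem.List.insertBy (fun a b => decide (key a < key b)) x (PySem.List.sorted t key false) := by
      rw [PySem.List.sorted_eq_foldl_insertBy, List.foldl_append, ← PySem.List.sorted_eq_foldl_insertBy]
      simp
    have hm : PySem.List.min? (t ++ [x]) key
        = match PySem.List.min? t key with
          | none => some x
          | some m => if key x < key m then some x else some m := by
      rw [PySem.List.min?, List.foldl_append, PySem.List.min?]; rfl
    rw [hm, hs, ih]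
    cases hsort : PySem.List.sorted t key false with
    | nil => simp [PySem.List.insertBy]
    | cons y ys =>
      by_cases h : key x < key y
      · simp [PySem.List.insertBy, h]
      · simp [PySem.List.insertBy, h]

theorem swL_head (lst : List String) (w : String) (h : lst ≠ []) :
    PySem.List.pyGetD (similarWordsL lst w) 0 ""
      = (PySem.List.min? lst (fun d => levA d w)).getD "" := by
  unfold similarWordsL
  simp only [PySem.List.foldl_append_singleton_eq_map, List.nil_append]
  rw [sorted_map_pf (fun d => levA d w) lst]
  set sl := PySem.List.sorted lst (fun d => levA d w) false with hsl
  have hne : sl ≠ [] := by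
    rw [hsl]; simpa [PySem.List.sorted_eq_nil_iff]
  obtain ⟨m, t, hmt⟩ := List.exists_cons_of_ne_nil hne
  rw [min?_eq_head_sorted, ← hsl, hmt]
  have hlen : ((m :: t).map (fun y => (y, levA y w))).length = t.length + 1 := by simp
  set L : Int := (((m :: t).map (fun y => (y, levA y w))).length : Int) with hL
  have hL1 : 1 ≤ L ∧ L = (t.length : Int) + 1 := by constructor <;> simp [hL]
  set size : Int := if L > 10 then 10 else L with hsize
  have hs1 : 1 ≤ size ∧ size ≤ L := by
    constructor <;> rw [hsize] <;> split_ifs with h <;> omega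
  have hq : (size - 1).toNat < ((m :: t).map (fun y => (y, levA y w))).length := by
    omega
  have hEq : PySem.List.sorted (lst.map (fun y => (y, levA y w))) (fun p => p.2) false
      = (m :: t).map (fun y => (y, levA y w)) := by
    rw [sorted_map_pf (fun d => levA d w) lst, ← hsl, hmt]
  have hq' : (size - 1).toNat
      < (PySem.List.sorted (lst.map (fun y => (y, levA y w))) (fun p => p.2) false).length := by
    rw [hEq]; exact hq
  have hmd := PySem.List.key_sorted_getElem_mono
      (xs := lst.map (fun y => (y, levA y w))) (key := fun p => p.2)
      (p := 0) (q := (size - 1).toNat) (Nat.zero_le _) hq'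
  rw [List.getElem_of_eq hEq, List.getElem_of_eq hEq] at hmd
  have hget : PySem.List.pyGetD ((m :: t).map (fun y => (y, levA y w))) (size - 1) ("", 0)
      = (((m :: t).map (fun y => (y, levA y w)))[(size - 1).toNat]'hq) := by
    rw [PySem.List.pyGetD_of_nonneg _ _ (by omega)]
    exact List.getD_eq_getElem _ _ hq
  rw [hget]
  set md := (((m :: t).map (fun y => (y, levA y w)))[(size - 1).toNat]'hq).2 with hmddef
  have hcond : levA m w ≤ md := by simpa using hmd
  simp only [List.map_cons, collectLE]
  rw [if_pos (by simpa using hcond)]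
  rw [PySem.List.pyGetD_of_nonneg _ _ (by norm_num)]
  simp

theorem per_word (dict : List String) (w : String) (hd : dict ≠ []) :
    PySem.List.pyGetD
        (if (similarWordsJ dict w).length = 0 then similarWordsL dict w
         else similarWordsL (similarWordsJ dict w) w) 0 ""
    = (PySem.List.min? ((dict.foldl (topStep w) []).map (fun p => p.1))
        (fun d => levB d w)).getD "" := by
  have hlen : (similarWordsJ dict w).length = min 10 dict.length := by
    rw [simJ_eq_top, top_eq_sorted]
    simp [PySem.List.length_sorted]
  have hdl : 0 < dict.length := List.length_pos_of_ne_nil hd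
  have hne0 : ¬ (similarWordsJ dict w).length = 0 := by omega
  rw [if_neg hne0]
  have hjne : similarWordsJ dict w ≠ [] := by
    intro hcon; rw [hcon] at hlen; simp at hlen; omega
  rw [swL_head _ _ hjne, simJ_eq_top]
  simp only [lev_eq]

theorem foldl_if_append {α β : Type} (c : α → Bool) (f g : α → β) (l : List α) :
    l.foldl (fun acc w => if c w then acc ++ [f w] else acc ++ [g w]) []
      = l.map (fun w => if c w then f w else g w) := by
  have : ∀ (l : List α) (acc : List β),
      l.foldl (fun acc w => if c w then acc ++ [f w] else acc ++ [g w]) acc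
        = acc ++ l.map (fun w => if c w then f w else g w) := by
    intro l
    induction l with
    | nil => simp
    | cons a t ih => intro acc; by_cases h : c a <;> simp [h, ih]
  simpa using this l []

-- ===== VERDICT (by name: the statement is the Claim_ definition above) =====
theorem correct_query_spec : Claim_equal_correct_query := by
  intro q dict _ hpre
  unfold Spec_correct_query
  have hA : correct_query q dict
      = (PySem.Str.split₀ q).map (fun w => if dict.contains w then w
          else PySem.List.pyGetD
            (if (similarWordsJ dict w).length = 0 then similarWordsL dict w
             else similarWordsL (similarWordsJ dict w) w) 0 "") :=
    foldl_if_append (fun w => dict.contains w) (fun w => w)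
      (fun w => PySem.List.pyGetD
        (if (similarWordsJ dict w).length = 0 then similarWordsL dict w
         else similarWordsL (similarWordsJ dict w) w) 0 "") _
  have hB : correct_query_alt q dict
      = (PySem.Str.split₀ q).map (fun w => if dict.contains w then w
          else (PySem.List.min? ((dict.foldl (topStep w) []).map (fun p : String × ℚ => p.1))
            (fun d => levB d w)).getD "") :=
    foldl_if_append (fun w => dict.contains w) (fun w => w)
      (fun w => (PySem.List.min? ((dict.foldl (topStep w) []).map (fun p : String × ℚ => p.1))
        (fun d => levB d w)).getD "") _
  rw [hA, hB]
  apply List.map_congr_left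
  intro w hwmem
  by_cases hc : dict.contains w
  · have hm : w ∈ dict := by simpa using hc
    simp [hm]
  · simp only [hc, Bool.false_eq_true, if_false]
    have hnotmem : w ∉ dict := by simpa using hc
    rcases hpre w hwmem with hmem | ⟨hd, _⟩
    · exact absurd hmem hnotmem
    · exact per_word dict w hd
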